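-- pv_equiv track=rewrite | github.com/JSebastian-Villa/Analisis_de_algoritmos | dyv.py | cuantos_son_pares
-- ===== SOURCE A (Python) =====
-- def cuantos_son_pares(arreglo, inicio, fin):
--     if inicio == fin:
--         if arreglo[inicio] % 2 == 0:
--             return 1
--         else:
--             return 0
--
--     medio = (inicio + fin) // 2
--
--     pares_izq = cuantos_son_pares(arreglo, inicio, medio)
--     pared_der = cuantos_son_pares(arreglo, medio + 1, fin)
--
--     return pared_der + pares_izq
-- ===== SOURCE B (Python) =====
-- def cuantos_son_pares(arreglo, inicio, fin):
--     contador = 0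
--     for i in range(inicio, fin + 1):
--         if arreglo[i] % 2 == 0:
--             contador += 1
--     return contador
-- ===== Notes on version B (the rewrite author's own statement) =====
-- stated objective: idiomatic
-- what changed: Replaces the binary divide-and-conquer recursion with a single flat counting loop over range(inicio, fin+1).
import Mathlib
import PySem

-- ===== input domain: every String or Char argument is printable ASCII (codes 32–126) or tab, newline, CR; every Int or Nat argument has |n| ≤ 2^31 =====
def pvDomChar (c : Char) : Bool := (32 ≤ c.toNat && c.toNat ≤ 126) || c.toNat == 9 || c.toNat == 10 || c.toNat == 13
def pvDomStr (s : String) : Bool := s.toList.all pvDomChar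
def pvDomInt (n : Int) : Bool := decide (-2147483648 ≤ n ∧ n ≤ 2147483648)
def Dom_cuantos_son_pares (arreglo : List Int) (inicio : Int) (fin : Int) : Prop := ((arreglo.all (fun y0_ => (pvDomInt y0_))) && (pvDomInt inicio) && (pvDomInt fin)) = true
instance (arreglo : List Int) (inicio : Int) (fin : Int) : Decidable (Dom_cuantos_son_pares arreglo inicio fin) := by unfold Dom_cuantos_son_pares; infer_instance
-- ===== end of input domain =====

-- B replaces A's divide-and-conquer recursion with a single flat counting loop (idiomatic; same O(n) cost).

-- ===== PORT A =====
-- Literal port of the recursion; the `fin < inicio` branch is a totality guard only: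
-- there the Python recursion never reaches its base case (RecursionError), excluded by Pre_.
def cuantos_son_pares (arreglo : List Int) (inicio : Int) (fin : Int) : Int :=
  if inicio = fin then
    if PySem.Int.mod (PySem.List.pyGetD arreglo inicio 0) 2 = 0 then 1 else 0
  else if _h : fin < inicio then 0
  else
    let medio := PySem.Int.floordiv (inicio + fin) 2
    let pares_izq := cuantos_son_pares arreglo inicio medio
    let pared_der := cuantos_son_pares arreglo (medio + 1) fin
    pared_der + pares_izq
termination_by (fin - inicio).toNat
decreasing_by
  · have := PySem.Int.floordiv_two_mid_bounds (lo := inicio) (hi := fin) (by omega)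
    have h2 : PySem.Int.floordiv (inicio + fin) 2 < fin := by
      rw [PySem.Int.floordiv_lt_iff_lt_mul (by omega)]; omega
    omega
  · have := PySem.Int.floordiv_two_mid_bounds (lo := inicio) (hi := fin) (by omega)
    omega

-- ===== PORT B =====
def cuantos_son_pares_alt (arreglo : List Int) (inicio : Int) (fin : Int) : Int :=
  (PySem.List.pyRange inicio (fin + 1) 1).foldl
    (fun contador i =>
      if PySem.Int.mod (PySem.List.pyGetD arreglo i 0) 2 = 0 then contador + 1 else contador) 0

-- ===== PRECONDITION & SPEC =====
-- Pre_ is exactly where the Python A returns: a nonempty window inicio ≤ fin whose every index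
-- (negative ones via Python wraparound) is in range; inicio > fin gives RecursionError,
-- out-of-range indices give IndexError.
def Pre_cuantos_son_pares (arreglo : List Int) (inicio : Int) (fin : Int) : Prop :=
  -(arreglo.length : Int) ≤ inicio ∧ inicio ≤ fin ∧ fin < (arreglo.length : Int)
instance (arreglo : List Int) (inicio : Int) (fin : Int) : Decidable (Pre_cuantos_son_pares arreglo inicio fin) := by unfold Pre_cuantos_son_pares; infer_instance

def pvWitness_cuantos_son_pares : List Int × Int × Int := ([2, 3, 5], 0, 2)

def Spec_cuantos_son_pares (arreglo : List Int) (inicio : Int) (fin : Int) (out : Int) : Prop := out = cuantos_son_pares_alt arreglo inicio fin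
instance (arreglo : List Int) (inicio : Int) (fin : Int) (out : Int) : Decidable (Spec_cuantos_son_pares arreglo inicio fin out) := by unfold Spec_cuantos_son_pares; infer_instance

-- ===== CLAIM (what is proved, stated in full; the proofs are below) =====
def Claim_equal_cuantos_son_pares : Prop := ∀ (arreglo : List Int) (inicio : Int) (fin : Int), Dom_cuantos_son_pares arreglo inicio fin → Pre_cuantos_son_pares arreglo inicio fin → Spec_cuantos_son_pares arreglo inicio fin (cuantos_son_pares arreglo inicio fin)

-- ===== LEMMAS AND PROOFS =====

-- B's loop body only adds 0 or 1, so the accumulator shifts out of the fold.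
lemma alt_foldl_shift (arreglo : List Int) (l : List Int) (c : Int) :
    l.foldl (fun contador i =>
      if PySem.Int.mod (PySem.List.pyGetD arreglo i 0) 2 = 0 then contador + 1 else contador) c
    = c + l.foldl (fun contador i =>
      if PySem.Int.mod (PySem.List.pyGetD arreglo i 0) 2 = 0 then contador + 1 else contador) 0 := by
  induction l generalizing c with
  | nil => simp
  | cons x xs ih =>
    simp only [List.foldl_cons]
    rw [ih]
    conv_rhs => rw [ih]
    split <;> ring

-- B's count over [inicio, fin] splits at any midpoint inicio ≤ m < fin.
lemma alt_split (arreglo : List Int) (inicio m fin : Int)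
    (h1 : inicio ≤ m) (h2 : m < fin) :
    cuantos_son_pares_alt arreglo inicio fin
      = cuantos_son_pares_alt arreglo inicio m + cuantos_son_pares_alt arreglo (m + 1) fin := by
  unfold cuantos_son_pares_alt
  rw [PySem.List.pyRange_one_append inicio (m + 1) (fin + 1) (by omega) (by omega),
    List.foldl_append, alt_foldl_shift]

lemma key (arreglo : List Int) (inicio fin : Int) (h : inicio ≤ fin) :
    cuantos_son_pares arreglo inicio fin = cuantos_son_pares_alt arreglo inicio fin := by
  by_cases heq : inicio = fin
  · subst heq
    unfold cuantos_son_pares cuantos_son_pares_alt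
    rw [PySem.List.pyRange_one_singleton]
    simp
  · have hlt : inicio < fin := by omega
    have hmid := PySem.Int.floordiv_two_mid_bounds (lo := inicio) (hi := fin) (by omega)
    have hmlt : PySem.Int.floordiv (inicio + fin) 2 < fin := by
      rw [PySem.Int.floordiv_lt_iff_lt_mul (by omega)]; omega
    rw [cuantos_son_pares, if_neg heq, dif_neg (by omega : ¬ fin < inicio)]
    dsimp only
    rw [key arreglo inicio _ (by omega), key arreglo _ fin (by omega),
      alt_split arreglo inicio (PySem.Int.floordiv (inicio + fin) 2) fin hmid.1 hmlt]
    ring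
termination_by (fin - inicio).toNat
decreasing_by
  · have hmid := PySem.Int.floordiv_two_mid_bounds (lo := inicio) (hi := fin) (by omega)
    omega
  · have hmid := PySem.Int.floordiv_two_mid_bounds (lo := inicio) (hi := fin) (by omega)
    omega

-- ===== VERDICT (by name: the statement is the Claim_ definition above) =====
theorem cuantos_son_pares_spec : Claim_equal_cuantos_son_pares := by
  intro arreglo inicio fin _ hpre
  exact key arreglo inicio fin hpre.2.1
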